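-- pv_equiv track=rewrite | github.com/SergeyB81/Leetcode | pythonProject_57/1.py | intercept
-- ===== SOURCE A (Python) =====
-- def intercept(command: str) -> str:
--     n = len(command)
--     command = list(command)
--
--     for i in range(1, n):
--         if command[i-1] == '(' and command[i] == ')':
--             command[i-1] = 'o'
--             command[i] = ''
--
--     for i in range(0, n):
--         if command[i] in ['(', ')']:
--             command[i] = ''
--
--     return ''.join(command)
-- ===== SOURCE B (Python) =====
-- def intercept(command: str) -> str:
--     # single left-to-right pass with a one-bit state: whether the previous
--     # single pass; pending = previous char is an open paren still available to pair
--     out = []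
--     pending = False
--     for c in command:
--         if pending and c == ')':
--             out.append('o')
--             pending = False
--         elif c == '(':
--             pending = True
--         elif c == ')':
--             pending = False
--         else:
--             pending = False
--             out.append(c)
--     return ''.join(out)
-- ===== Notes on version B (the rewrite author's own statement) =====
-- stated objective: alternative
-- what changed: Replaced the two index-mutation passes over a mutable char list by a single left-to-right state-machine pass with a one-bit flag recording an unconsumed open parenthesis, emitting the replacement letter on a matching close parenthesis and dropping unmatched parentheses as it goes.
import Mathlib
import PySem

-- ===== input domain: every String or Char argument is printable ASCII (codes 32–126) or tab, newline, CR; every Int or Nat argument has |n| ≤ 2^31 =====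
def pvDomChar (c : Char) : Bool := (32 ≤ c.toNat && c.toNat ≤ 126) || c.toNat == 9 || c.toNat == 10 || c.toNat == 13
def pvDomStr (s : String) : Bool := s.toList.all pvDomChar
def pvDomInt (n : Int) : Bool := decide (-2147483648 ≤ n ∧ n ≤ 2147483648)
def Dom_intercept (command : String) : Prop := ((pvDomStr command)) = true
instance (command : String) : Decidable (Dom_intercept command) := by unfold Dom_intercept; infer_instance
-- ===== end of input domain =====

-- B replaces A's two index-mutation passes over a char list by a single left-to-right
-- state-machine pass with a one-bit flag for an unconsumed open parenthesis; return values
-- proved equal on all strings (measured faster by a constant factor).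

-- ===== PORT A =====
def intercept (command : String) : String :=
  let n : Int := PySem.Str.len command
  let cmd0 : List String := command.toList.map (fun c => String.ofList [c])
  let cmd1 := (PySem.List.pyRange 1 n 1).foldl
    (fun cmd i =>
      if PySem.List.pyGetD cmd (i - 1) "" == "(" && PySem.List.pyGetD cmd i "" == ")" then
        PySem.List.pySetD (PySem.List.pySetD cmd (i - 1) "o") i ""
      else cmd) cmd0
  let cmd2 := (PySem.List.pyRange 0 n 1).foldl
    (fun cmd i =>
      if (["(", ")"] : List String).contains (PySem.List.pyGetD cmd i "") then
        PySem.List.pySetD cmd i ""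
      else cmd) cmd1
  PySem.Str.join "" cmd2

-- ===== PORT B =====
def intercept_alt (command : String) : String :=
  let st := command.toList.foldl
    (fun (st : List String × Bool) c =>
      if st.2 && (c == ')') then (st.1 ++ ["o"], false)
      else if c == '(' then (st.1, true)
      else if c == ')' then (st.1, false)
      else (st.1 ++ [String.ofList [c]], false)) ([], false)
  PySem.Str.join "" st.1

-- ===== PRECONDITION & SPEC =====
def Spec_intercept (command : String) (out : String) : Prop := out = intercept_alt command
instance (command : String) (out : String) : Decidable (Spec_intercept command out) := by unfold Spec_intercept; infer_instance

-- ===== CLAIM (what is proved, stated in full; the proofs are below) =====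
def Claim_equal_intercept : Prop := ∀ (command : String), Dom_intercept command → Spec_intercept command (intercept command)


-- ===== LEMMAS AND PROOFS =====

-- a one-character Python string (an element of list(command))
def pvSing (c : Char) : String := String.ofList [c]

-- the contents of A's list after the first loop
def pvPass1 : List Char → List String
  | [] => []
  | [c] => [pvSing c]
  | c1 :: c2 :: r =>
    if c1 = '(' ∧ c2 = ')' then "o" :: "" :: pvPass1 r else pvSing c1 :: pvPass1 (c2 :: r)

-- adjacent-pair collapse (intermediate characterisation shared by both proofs)
def pvCrep : List Char → List Char
  | [] => []
  | [c] => [c]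
  | c1 :: c2 :: r =>
    if c1 = '(' ∧ c2 = ')' then 'o' :: pvCrep r else c1 :: pvCrep (c2 :: r)

-- the body of A's first loop
def pvStepA (cmd : List String) (i : Int) : List String :=
  if PySem.List.pyGetD cmd (i - 1) "" == "(" && PySem.List.pyGetD cmd i "" == ")" then
    PySem.List.pySetD (PySem.List.pySetD cmd (i - 1) "o") i ""
  else cmd

-- the body of A's second loop
def pvStepB (cmd : List String) (i : Int) : List String :=
  if (["(", ")"] : List String).contains (PySem.List.pyGetD cmd i "") then
    PySem.List.pySetD cmd i ""
  else cmd

-- what A's second loop does to one cell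
def pvBlank (x : String) : String := if x = "(" ∨ x = ")" then "" else x

-- A's first loop, started at index P.length on state P ++ cs.map pvSing
def pvF1 (P : List String) (cs : List Char) : List String :=
  (PySem.List.pyRange (P.length : Int) ((P.length : Int) + (cs.length : Int)) 1).foldl pvStepA
    (P ++ cs.map pvSing)

-- B's loop body and the tail it appends from state b on input l
def pvStepC (st : List String × Bool) (c : Char) : List String × Bool :=
  if st.2 && (c == ')') then (st.1 ++ ["o"], false)
  else if c == '(' then (st.1, true)
  else if c == ')' then (st.1, false)
  else (st.1 ++ [String.ofList [c]], false)

def pvGo : List Char → Bool → List String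
  | [], _ => []
  | c :: r, b =>
    if b && (c == ')') then "o" :: pvGo r false
    else if c == '(' then pvGo r true
    else if c == ')' then pvGo r false
    else pvSing c :: pvGo r false

lemma pvSing_toList (c : Char) : (pvSing c).toList = [c] := String.toList_ofList

lemma pvSing_eq_iff (c d : Char) : pvSing c = pvSing d ↔ c = d := by
  constructor
  · intro h
    have := congrArg String.toList h
    simpa [pvSing_toList] using this
  · rintro rfl; rfl

lemma pv_getD_append (P : List String) (x d : String) (l : List String) :
    (P ++ x :: l).getD P.length d = x := by
  simp [List.getD_eq_getElem?_getD]

lemma pv_set_append (P : List String) (x v : String) (l : List String) :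
    (P ++ x :: l).set P.length v = P ++ v :: l := by
  rw [List.set_append_right _ _ (Nat.le_refl _)]
  simp

lemma pvPass1_cons_ne {c : Char} (hc : c ≠ '(') (r : List Char) :
    pvPass1 (c :: r) = pvSing c :: pvPass1 r := by
  cases r <;> simp [pvPass1, hc]

lemma pvCrep_cons_ne {c : Char} (hc : c ≠ '(') (r : List Char) :
    pvCrep (c :: r) = c :: pvCrep r := by
  cases r <;> simp [pvCrep, hc]

lemma pvPass1_length (l : List Char) : (pvPass1 l).length = l.length := by
  induction l using pvPass1.induct with
  | case1 => rfl
  | case2 c => rfl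
  | case3 c1 c2 r h ih => simp [pvPass1, h, ih]
  | case4 c1 c2 r h ih => simp [pvPass1, h, ih]

lemma pvSing_open : pvSing '(' = "(" := rfl
lemma pvSing_close : pvSing ')' = ")" := rfl
lemma pvSing_ne_open {c : Char} (hc : c ≠ '(') : pvSing c ≠ "(" := by
  rw [← pvSing_open]
  exact fun h => hc ((pvSing_eq_iff c '(').mp h)
lemma pvSing_ne_close {c : Char} (hc : c ≠ ')') : pvSing c ≠ ")" := by
  rw [← pvSing_close]
  exact fun h => hc ((pvSing_eq_iff c ')').mp h)

lemma pvF1_eq (P' : List String) (r : List Char) (a b : Int)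
    (ha : a = (P'.length : Int)) (hb : b = (P'.length : Int) + (r.length : Int)) :
    (PySem.List.pyRange a b 1).foldl pvStepA (P' ++ r.map pvSing) = pvF1 P' r := by
  subst ha hb; rfl

lemma pvLoop1 (cs : List Char) :
    (∀ P : List String, P ≠ [] → P.getLast? ≠ some "(" → pvF1 P cs = P ++ pvPass1 cs)
    ∧ (∀ P : List String, pvF1 (P ++ ["("]) cs = P ++ pvPass1 ('(' :: cs)) := by
  induction cs with
  | nil =>
    constructor
    · intro P _ _
      simp [pvF1, pvPass1, PySem.List.pyRange_one_eq_nil]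
    · intro P
      simp [pvF1, pvPass1, PySem.List.pyRange_one_eq_nil, pvSing_open]
  | cons c r ih =>
    constructor
    · intro P hne hlast
      obtain ⟨Q, y, rfl⟩ : ∃ Q y, P = Q ++ [y] :=
        ⟨P.dropLast, P.getLast hne, (List.dropLast_append_getLast hne).symm⟩
      have hy : y ≠ "(" := by
        simpa using hlast
      unfold pvF1
      rw [PySem.List.pyRange_one_cons (by simp only [List.length_append, List.length_cons, List.length_nil]; push_cast; omega), List.foldl_cons]
      have hidx : (((Q ++ [y]).length : Nat) : Int) - 1 = ((Q.length : Nat) : Int) := by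
        simp only [List.length_append, List.length_cons, List.length_nil]; push_cast; omega
      have hstep : pvStepA ((Q ++ [y]) ++ (c :: r).map pvSing) (((Q ++ [y]).length : Nat) : Int)
          = (Q ++ [y]) ++ (c :: r).map pvSing := by
        unfold pvStepA
        rw [hidx, PySem.List.pyGetD_natCast]
        have hg : ((Q ++ [y]) ++ (c :: r).map pvSing).getD Q.length "" = y := by
          rw [List.append_assoc, List.singleton_append]
          exact pv_getD_append Q y "" _
        rw [hg]
        simp [hy]
      rw [hstep]
      by_cases hc : c = '('
      · subst hc
        rw [show (Q ++ [y]) ++ ('(' :: r).map pvSing = (((Q ++ [y]) ++ ["("]) ++ r.map pvSing) by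
          simp [pvSing_open]]
        rw [pvF1_eq _ r _ _ (by simp only [List.length_append, List.length_cons, List.length_nil]; push_cast; omega)
          (by simp only [List.length_append, List.length_cons, List.length_nil]; push_cast; omega)]
        exact ih.2 (Q ++ [y])
      · rw [show (Q ++ [y]) ++ (c :: r).map pvSing = (((Q ++ [y]) ++ [pvSing c]) ++ r.map pvSing) by
          simp]
        rw [pvF1_eq _ r _ _ (by simp only [List.length_append, List.length_cons, List.length_nil]; push_cast; omega)
          (by simp only [List.length_append, List.length_cons, List.length_nil]; push_cast; omega)]
        rw [ih.1 ((Q ++ [y]) ++ [pvSing c]) (by simp) (by simpa using pvSing_ne_open hc)]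
        rw [pvPass1_cons_ne hc]
        simp
    · intro P
      unfold pvF1
      rw [PySem.List.pyRange_one_cons (by simp only [List.length_append, List.length_cons, List.length_nil]; push_cast; omega), List.foldl_cons]
      have hidx : (((P ++ ["("]).length : Nat) : Int) - 1 = ((P.length : Nat) : Int) := by
        simp only [List.length_append, List.length_cons, List.length_nil]; push_cast; omega
      have hg1 : ((P ++ ["("]) ++ (c :: r).map pvSing).getD P.length "" = "(" := by
        rw [List.append_assoc, List.singleton_append]
        exact pv_getD_append P "(" "" _
      have hg2 : ((P ++ ["("]) ++ (c :: r).map pvSing).getD (P ++ ["("]).length "" = pvSing c := by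
        exact pv_getD_append (P ++ ["("]) (pvSing c) "" _
      by_cases hc : c = ')'
      · subst hc
        have hstep : pvStepA ((P ++ ["("]) ++ (')' :: r).map pvSing) (((P ++ ["("]).length : Nat) : Int)
            = (P ++ ["o", ""]) ++ r.map pvSing := by
          unfold pvStepA
          rw [hidx, PySem.List.pyGetD_natCast, PySem.List.pyGetD_natCast, hg1, hg2, pvSing_close]
          rw [if_pos (by simp)]
          rw [PySem.List.pySetD_natCast, PySem.List.pySetD_natCast]
          rw [show (P ++ ["("]) ++ (')' :: r).map pvSing = P ++ "(" :: (pvSing ')' :: r.map pvSing) by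
            simp]
          rw [pv_set_append]
          rw [show P ++ "o" :: (pvSing ')' :: r.map pvSing) = (P ++ ["o"]) ++ pvSing ')' :: r.map pvSing by
            simp]
          rw [show (P ++ ["("]).length = (P ++ ["o"]).length by simp]
          rw [pv_set_append]
          simp
        rw [hstep]
        rw [pvF1_eq _ r _ _ (by simp only [List.length_append, List.length_cons, List.length_nil]; push_cast; omega)
          (by simp only [List.length_append, List.length_cons, List.length_nil]; push_cast; omega)]
        rw [ih.1 (P ++ ["o", ""]) (by simp) (by simp)]
        simp [pvPass1]
      · have hstep : pvStepA ((P ++ ["("]) ++ (c :: r).map pvSing) (((P ++ ["("]).length : Nat) : Int)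
            = (P ++ ["("]) ++ (c :: r).map pvSing := by
          unfold pvStepA
          rw [hidx, PySem.List.pyGetD_natCast, PySem.List.pyGetD_natCast, hg1, hg2]
          simp [pvSing_ne_close hc]
        rw [hstep]
        by_cases hco : c = '('
        · subst hco
          rw [show (P ++ ["("]) ++ ('(' :: r).map pvSing = ((P ++ ["("]) ++ ["("]) ++ r.map pvSing by
            simp [pvSing_open]]
          rw [pvF1_eq _ r _ _ (by simp only [List.length_append, List.length_cons, List.length_nil]; push_cast; omega)
            (by simp only [List.length_append, List.length_cons, List.length_nil]; push_cast; omega)]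
          rw [ih.2 (P ++ ["("])]
          simp [pvPass1, pvSing_open]
        · rw [show (P ++ ["("]) ++ (c :: r).map pvSing = ((P ++ ["(", pvSing c]) ++ r.map pvSing) by
            simp]
          rw [pvF1_eq _ r _ _ (by simp only [List.length_append, List.length_cons, List.length_nil]; push_cast; omega)
            (by simp only [List.length_append, List.length_cons, List.length_nil]; push_cast; omega)]
          rw [ih.1 (P ++ ["(", pvSing c]) (by simp) (by simpa using pvSing_ne_open hco)]
          rw [show pvPass1 ('(' :: c :: r) = pvSing '(' :: pvPass1 (c :: r) by simp [pvPass1, hc]]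
          rw [pvPass1_cons_ne hco, pvSing_open]
          simp

lemma pvLoop2 (xs : List String) : ∀ (P : List String),
    (PySem.List.pyRange (P.length : Int) ((P.length : Int) + (xs.length : Int)) 1).foldl pvStepB
      (P ++ xs) = P ++ xs.map pvBlank := by
  induction xs with
  | nil => intro P; simp [PySem.List.pyRange_one_eq_nil]
  | cons x t ih =>
    intro P
    rw [PySem.List.pyRange_one_cons (by push_cast [List.length_cons]; omega)]
    have hstep : pvStepB (P ++ x :: t) (P.length : Int) = P ++ pvBlank x :: t := by
      unfold pvStepB
      rw [PySem.List.pyGetD_natCast, pv_getD_append]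
      by_cases hx : x = "(" ∨ x = ")"
      · have hc : (["(", ")"] : List String).contains x = true := by
          rcases hx with rfl | rfl <;> rfl
        rw [hc, if_pos rfl, PySem.List.pySetD_natCast, pv_set_append]
        simp [pvBlank, hx]
      · rw [not_or] at hx
        have hc : (["(", ")"] : List String).contains x = false := by
          simp [hx.1, hx.2]
        rw [hc]
        simp [pvBlank, hx.1, hx.2]
    rw [List.foldl_cons, hstep]
    have e2 : (P.length : Int) + 1 = (((P ++ [pvBlank x]).length : Nat) : Int) := by
      simp
    have e3 : (P.length : Int) + ((x :: t).length : Int)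
        = (((P ++ [pvBlank x]).length : Nat) : Int) + (t.length : Int) := by
      simp; ring
    rw [e2, e3, show P ++ pvBlank x :: t = (P ++ [pvBlank x]) ++ t by simp]
    rw [ih (P ++ [pvBlank x])]
    simp

lemma pvBlank_sing (c : Char) :
    (pvBlank (pvSing c)).toList = if c = '(' ∨ c = ')' then [] else [c] := by
  by_cases h1 : c = '('
  · subst h1; rfl
  by_cases h2 : c = ')'
  · subst h2; rfl
  have : pvBlank (pvSing c) = pvSing c := by
    unfold pvBlank
    rw [if_neg]
    rintro (h | h)
    · exact h1 ((pvSing_eq_iff c '(').mp h)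
    · exact h2 ((pvSing_eq_iff c ')').mp h)
  simp [this, pvSing_toList, h1, h2]

lemma pvFlatten (l : List Char) :
    ((pvPass1 l).map (fun s => (pvBlank s).toList)).flatten
      = (pvCrep l).filter (fun c => !(c == ')') && !(c == '(')) := by
  have ho : (pvBlank "o").toList = ['o'] := rfl
  have he : (pvBlank "").toList = [] := rfl
  induction l using pvPass1.induct with
  | case1 => rfl
  | case2 c =>
    by_cases h1 : c = '(' <;> by_cases h2 : c = ')' <;>
      simp [pvPass1, pvCrep, pvBlank_sing, h1, h2]
  | case3 c1 c2 r h ih =>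
    obtain ⟨rfl, rfl⟩ := h
    simp [pvPass1, pvCrep, ho, he, ih]
  | case4 c1 c2 r h ih =>
    by_cases h1 : c1 = '('
    · have hc2 : c2 ≠ ')' := fun hh => h ⟨h1, hh⟩
      simp [pvPass1, pvCrep, pvBlank_sing, h1, hc2, ih]
    · by_cases h2 : c1 = ')' <;> simp [pvPass1, pvCrep, pvBlank_sing, h1, h2, ih]

lemma pvJoin_empty (parts : List String) :
    PySem.Str.join "" parts = String.ofList ((parts.map String.toList).flatten) := by
  have hflat : ∀ (l : List (List Char)), (List.intersperse ([] : List Char) l).flatten = l.flatten := by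
    intro l
    induction l with
    | nil => rfl
    | cons x t ih => cases t <;> simp_all [List.intersperse]
  simp [PySem.Str.join, PySem.Chars.join, List.intercalate, hflat]

lemma pvA_eq (command : String) :
    intercept command
      = String.ofList (((pvPass1 command.toList).map (fun s => (pvBlank s).toList)).flatten) := by
  have hlen : PySem.Str.len command = (command.toList.length : Int) := by
    simp [PySem.Str.len]
  show PySem.Str.join ""
      ((PySem.List.pyRange 0 (PySem.Str.len command) 1).foldl pvStepB
        ((PySem.List.pyRange 1 (PySem.Str.len command) 1).foldl pvStepA
          (command.toList.map pvSing))) = _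
  rw [hlen]
  have h1 : (PySem.List.pyRange 1 ((command.toList.length : Nat) : Int) 1).foldl pvStepA
      (command.toList.map pvSing) = pvPass1 command.toList := by
    cases hcs : command.toList with
    | nil => simp [PySem.List.pyRange_one_eq_nil, pvPass1]
    | cons c t =>
      have e : ((c :: t).length : Int) = ((([pvSing c] : List String).length : Nat) : Int)
          + ((t.length : Nat) : Int) := by
        simp only [List.length_cons, List.length_nil]; push_cast; omega
      by_cases hc : c = '('
      · subst hc
        have h := (pvLoop1 t).2 []
        simp only [pvF1, List.nil_append, List.length_singleton] at h
        rw [show (1 : Int) = ((([("(" : String)] : List String).length : Nat) : Int) by simp, e]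
        simpa [pvSing_open] using h
      · have h := (pvLoop1 t).1 [pvSing c] (by simp) (by simpa using pvSing_ne_open hc)
        simp only [pvF1, List.length_singleton] at h
        rw [show (1 : Int) = ((([pvSing c] : List String).length : Nat) : Int) by simp, e]
        rw [pvPass1_cons_ne hc]
        simpa using h
  rw [h1]
  have h2 : (PySem.List.pyRange 0 ((command.toList.length : Nat) : Int) 1).foldl pvStepB
      (pvPass1 command.toList) = (pvPass1 command.toList).map pvBlank := by
    have h := pvLoop2 (pvPass1 command.toList) []
    simp only [List.length_nil, List.nil_append, Nat.cast_zero, zero_add] at h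
    rw [show ((command.toList.length : Nat) : Int) = (((pvPass1 command.toList).length : Nat) : Int) by
      rw [pvPass1_length]]
    exact h
  rw [h2, pvJoin_empty]
  simp [Function.comp_def]

-- B's fold appends pvGo l b to the accumulated output
lemma pvFoldC (l : List Char) : ∀ (P : List String) (b : Bool),
    (l.foldl pvStepC (P, b)).1 = P ++ pvGo l b := by
  induction l with
  | nil => intro P b; simp [pvGo]
  | cons c r ih =>
    intro P b
    simp only [List.foldl_cons]
    by_cases h2 : c = ')'
    · subst h2
      cases b with
      | true =>
        rw [show pvStepC (P, true) ')' = (P ++ ["o"], false) by simp [pvStepC]]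
        rw [ih, show pvGo (')' :: r) true = "o" :: pvGo r false by simp [pvGo]]
        simp
      | false =>
        rw [show pvStepC (P, false) ')' = (P, false) by simp [pvStepC]]
        rw [ih, show pvGo (')' :: r) false = pvGo r false by simp [pvGo]]
    · by_cases h1 : c = '('
      · subst h1
        rw [show pvStepC (P, b) '(' = (P, true) by simp [pvStepC]]
        rw [ih, show pvGo ('(' :: r) b = pvGo r true by simp [pvGo]]
      · rw [show pvStepC (P, b) c = (P ++ [pvSing c], false) by
          simp [pvStepC, pvSing, h1, h2]]
        rw [ih, show pvGo (c :: r) b = pvSing c :: pvGo r false by simp [pvGo, h1, h2]]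
        simp

-- B's state machine computes the stripped pair-collapse, for both start states
lemma pvGo_crep (l : List Char) :
    ((pvGo l false).map String.toList).flatten
        = (pvCrep l).filter (fun c => !(c == ')') && !(c == '('))
    ∧ ((pvGo l true).map String.toList).flatten
        = (pvCrep ('(' :: l)).filter (fun c => !(c == ')') && !(c == '(')) := by
  induction l with
  | nil => exact ⟨rfl, rfl⟩
  | cons c r ih =>
    constructor
    · by_cases h1 : c = '('
      · subst h1
        have : pvGo ('(' :: r) false = pvGo r true := by simp [pvGo]
        rw [this, ih.2]
      · rw [show pvGo (c :: r) false
            = (if c = ')' then pvGo r false else pvSing c :: pvGo r false) by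
          simp [pvGo, h1]]
        rw [pvCrep_cons_ne h1]
        by_cases h2 : c = ')'
        · subst h2; simpa using ih.1
        · simp [h1, h2, pvSing_toList, ih.1]
    · by_cases h2 : c = ')'
      · subst h2
        have hg : pvGo (')' :: r) true = "o" :: pvGo r false := by simp [pvGo]
        have hc : pvCrep ('(' :: ')' :: r) = 'o' :: pvCrep r := by simp [pvCrep]
        rw [hg, hc]
        simpa using ih.1
      · have hc : pvCrep ('(' :: c :: r) = '(' :: pvCrep (c :: r) := by
          simp [pvCrep, h2]
        rw [hc]
        by_cases h1 : c = '('
        · subst h1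
          have hg : pvGo ('(' :: r) true = pvGo r true := by simp [pvGo]
          rw [hg]
          simpa using ih.2
        · have hg : pvGo (c :: r) true = pvSing c :: pvGo r false := by
            simp [pvGo, h1, h2]
          rw [hg, pvCrep_cons_ne h1]
          simp [h1, h2, pvSing_toList, ih.1]

lemma pvB_eq (command : String) :
    intercept_alt command
      = String.ofList ((pvCrep command.toList).filter (fun c => !(c == ')') && !(c == '('))) := by
  show PySem.Str.join "" (command.toList.foldl pvStepC ([], false)).1 = _
  rw [pvFoldC command.toList [] false, List.nil_append, pvJoin_empty,
    (pvGo_crep command.toList).1]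

-- ===== VERDICT (by name: the statement is the Claim_ definition above) =====
theorem intercept_spec : Claim_equal_intercept := by
  intro command _
  show intercept command = intercept_alt command
  rw [pvA_eq, pvB_eq]
  exact congrArg String.ofList (pvFlatten command.toList)
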